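-- pv_equiv track=rewrite | github.com/homexjh/agent-assistant | aiagent/serve.py | _generate_summary_with_rule
-- ===== SOURCE A (Python) =====
-- def _generate_summary_with_rule(valid_msgs: list[dict]) -> str:
--     """使用规则提取摘要（免费、快速）"""
--     # 取最后一条用户消息作为摘要
--     last_user_msg = None
--     for m in reversed(valid_msgs):
--         if m["role"] == "user":
--             last_user_msg = m["content"][:50]
--             break
--
--     # 统计用户消息数量
--     user_count = sum(1 for m in valid_msgs if m["role"] == "user")
--
--     if last_user_msg:
--         if user_count >= 10:
--             return f"深入讨论: {last_user_msg}..."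
--         elif user_count >= 5:
--             return f"对话: {last_user_msg}..."
--         else:
--             return f"询问: {last_user_msg}..."
--     else:
--         return "对话完成"
-- ===== SOURCE B (Python) =====
-- def _generate_summary_with_rule(valid_msgs: list[dict]) -> str:
--     """使用规则提取摘要（免费、快速）"""
--     # Single forward pass: running user count + reference to the most recent user message.
--     user_count = 0
--     last_msg = None
--     for m in valid_msgs:
--         if m["role"] == "user":
--             user_count += 1
--             last_msg = m
--
--     last_user = last_msg["content"][:50] if last_msg is not None else ""
--     if last_user:
--         if user_count >= 10:
--             return f"深入讨论: {last_user}..."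
--         elif user_count >= 5:
--             return f"对话: {last_user}..."
--         else:
--             return f"询问: {last_user}..."
--     return "对话完成"
-- ===== Notes on version B (the rewrite author's own statement) =====
-- stated objective: simpler
-- what changed: Replaces A's reversed scan-with-break plus a separate counting comprehension by one forward loop that maintains the user count and a reference to the most recent user message, reading its content prefix once after the loop.
import Mathlib
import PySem

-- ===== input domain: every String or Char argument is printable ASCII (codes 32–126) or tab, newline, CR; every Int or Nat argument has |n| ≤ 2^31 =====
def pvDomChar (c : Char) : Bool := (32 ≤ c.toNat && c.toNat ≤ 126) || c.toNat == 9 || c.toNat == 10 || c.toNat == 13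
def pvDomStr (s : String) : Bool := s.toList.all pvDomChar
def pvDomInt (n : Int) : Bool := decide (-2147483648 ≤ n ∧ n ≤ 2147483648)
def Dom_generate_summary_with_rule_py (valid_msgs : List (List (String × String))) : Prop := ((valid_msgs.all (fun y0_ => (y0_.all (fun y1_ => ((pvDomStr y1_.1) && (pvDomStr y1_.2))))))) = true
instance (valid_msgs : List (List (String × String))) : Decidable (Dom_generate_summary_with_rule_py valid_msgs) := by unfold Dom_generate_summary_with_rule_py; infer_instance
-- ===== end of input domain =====

-- B replaces A's reversed scan-with-break plus separate count by one forward pass; objective: simpler.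

-- ===== PORT A =====
-- field accessors (m["role"], m["content"][:50]); total defaults are safe under Pre_ (keys present where read)
def pvRole (m : List (String × String)) : String := PySem.Dict.getD (PySem.Dict.mk m) "role" ""
def pvContent50 (m : List (String × String)) : String :=
  PySem.Str.slice (PySem.Dict.getD (PySem.Dict.mk m) "content" "") none (some (50 : Int))

-- the 'for m in reversed(valid_msgs): … break' loop, applied to valid_msgs.reverse
def pvLastUserScan : List (List (String × String)) → Option String
  | [] => none
  | m :: rest => if pvRole m = "user" then some (pvContent50 m) else pvLastUserScan rest

def generate_summary_with_rule_py (valid_msgs : List (List (String × String))) : String :=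
  let last_user_msg : Option String := pvLastUserScan valid_msgs.reverse
  let user_count : Int :=
    valid_msgs.foldl (fun acc m => if pvRole m = "user" then acc + 1 else acc) 0
  match last_user_msg with
  | some s =>
      if s ≠ "" then
        if user_count ≥ 10 then "深入讨论: " ++ s ++ "..."
        else if user_count ≥ 5 then "对话: " ++ s ++ "..."
        else "询问: " ++ s ++ "..."
      else "对话完成"
  | none => "对话完成"

-- ===== PORT B =====
def pvStepB (st : Int × Option (List (String × String))) (m : List (String × String)) :
    Int × Option (List (String × String)) :=
  if pvRole m = "user" then (st.1 + 1, some m) else st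

def generate_summary_with_rule_py_alt (valid_msgs : List (List (String × String))) : String :=
  let st := valid_msgs.foldl pvStepB (0, none)
  let last_user : String := match st.2 with | some m => pvContent50 m | none => ""
  if last_user ≠ "" then
    if st.1 ≥ 10 then "深入讨论: " ++ last_user ++ "..."
    else if st.1 ≥ 5 then "对话: " ++ last_user ++ "..."
    else "询问: " ++ last_user ++ "..."
  else "对话完成"

-- ===== PRECONDITION & SPEC =====
-- Pre_ = exactly the inputs where Python A returns without a KeyError: every message has a
-- "role" key, and a user-role message with no later user-role message (i.e. the last one,
-- the only message whose "content" A reads) has a "content" key.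
def Pre_generate_summary_with_rule_py (valid_msgs : List (List (String × String))) : Prop :=
  (∀ m ∈ valid_msgs, ((PySem.Dict.mk m).get? "role").isSome = true) ∧
  (∀ i, i < valid_msgs.length → pvRole (valid_msgs.getD i []) = "user" →
    (∀ j, j < valid_msgs.length → i < j → pvRole (valid_msgs.getD j []) ≠ "user") →
    ((PySem.Dict.mk (valid_msgs.getD i [])).get? "content").isSome = true)
instance (valid_msgs : List (List (String × String))) : Decidable (Pre_generate_summary_with_rule_py valid_msgs) := by
  unfold Pre_generate_summary_with_rule_py; infer_instance

def pvWitness_generate_summary_with_rule_py : (List (List (String × String))) :=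
  [[("role", "user"), ("content", "hello")]]

def Spec_generate_summary_with_rule_py (valid_msgs : List (List (String × String))) (out : String) : Prop := out = generate_summary_with_rule_py_alt valid_msgs
instance (valid_msgs : List (List (String × String))) (out : String) : Decidable (Spec_generate_summary_with_rule_py valid_msgs out) := by unfold Spec_generate_summary_with_rule_py; infer_instance

-- ===== CLAIM (what is proved, stated in full; the proofs are below) =====
def Claim_equal_generate_summary_with_rule_py : Prop := ∀ (valid_msgs : List (List (String × String))), Dom_generate_summary_with_rule_py valid_msgs → Pre_generate_summary_with_rule_py valid_msgs → Spec_generate_summary_with_rule_py valid_msgs (generate_summary_with_rule_py valid_msgs)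

-- ===== LEMMAS AND PROOFS =====

def pvLastMsgScan : List (List (String × String)) → Option (List (String × String))
  | [] => none
  | m :: rest => if pvRole m = "user" then some m else pvLastMsgScan rest


lemma pvLastUserScan_eq_map (xs : List (List (String × String))) :
    pvLastUserScan xs = (pvLastMsgScan xs).map pvContent50 := by
  induction xs with
  | nil => simp [pvLastUserScan, pvLastMsgScan]
  | cons m rest ih =>
      by_cases h : pvRole m = "user" <;> simp [pvLastUserScan, pvLastMsgScan, h, ih]

lemma pvLastMsgScan_append (xs : List (List (String × String))) (m : List (String × String)) :
    pvLastMsgScan (xs ++ [m]) =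
      match pvLastMsgScan xs with
      | some s => some s
      | none => if pvRole m = "user" then some m else none := by
  induction xs with
  | nil => simp [pvLastMsgScan]
  | cons x xs ih =>
      by_cases h : pvRole x = "user" <;> simp [pvLastMsgScan, h, ih]

-- forward formulation of the reversed scan
def pvLastFwd : List (List (String × String)) → Option (List (String × String)) → Option (List (String × String))
  | [], l => l
  | m :: rest, l => pvLastFwd rest (if pvRole m = "user" then some m else l)

lemma pvLastFwd_eq_scan (msgs : List (List (String × String)))
    (l : Option (List (String × String))) :
    pvLastFwd msgs l =
      match pvLastMsgScan msgs.reverse with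
      | some s => some s
      | none => l := by
  induction msgs generalizing l with
  | nil => simp [pvLastFwd, pvLastMsgScan]
  | cons m rest ih =>
      rw [pvLastFwd, ih]
      rw [List.reverse_cons, pvLastMsgScan_append]
      by_cases h : pvRole m = "user" <;>
        cases pvLastMsgScan rest.reverse <;> simp [h]

lemma pvCount_shift (msgs : List (List (String × String))) (c : Int) :
    msgs.foldl (fun acc m => if pvRole m = "user" then acc + 1 else acc) c =
      c + msgs.foldl (fun acc m => if pvRole m = "user" then acc + 1 else acc) 0 := by
  induction msgs generalizing c with
  | nil => simp
  | cons m rest ih =>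
      by_cases h : pvRole m = "user"
      · simp only [List.foldl_cons, h, ite_true]
        rw [ih (c + 1), ih (0 + 1)]; ring
      · simp only [List.foldl_cons, h, ite_false]
        exact ih c

lemma pvFoldB_eq (msgs : List (List (String × String))) (c : Int)
    (l : Option (List (String × String))) :
    msgs.foldl pvStepB (c, l) =
      (c + msgs.foldl (fun acc m => if pvRole m = "user" then acc + 1 else acc) 0,
       pvLastFwd msgs l) := by
  induction msgs generalizing c l with
  | nil => simp [pvLastFwd]
  | cons m rest ih =>
      by_cases h : pvRole m = "user"
      · simp only [List.foldl_cons, pvStepB, h, ite_true, pvLastFwd]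
        rw [ih (c + 1) (some m), pvCount_shift rest (0 + 1)]
        simp only [Prod.mk.injEq]
        exact ⟨by ring, trivial⟩
      · simp only [List.foldl_cons, pvStepB, h, ite_false, pvLastFwd]
        exact ih c l

-- ===== VERDICT (by name: the statement is the Claim_ definition above) =====
theorem generate_summary_with_rule_py_spec : Claim_equal_generate_summary_with_rule_py := by
  intro msgs _ _
  unfold Spec_generate_summary_with_rule_py
  unfold generate_summary_with_rule_py generate_summary_with_rule_py_alt
  rw [pvFoldB_eq, pvLastFwd_eq_scan, pvLastUserScan_eq_map]
  cases hs : pvLastMsgScan msgs.reverse with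
  | none => simp
  | some m =>
      by_cases he : pvContent50 m = "" <;> simp [he]
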